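-- pv_equiv track=rewrite | github.com/mvillmow/ProjectOdyssey | scripts/fix_markdown_lint.py | fix_blank_lines_around_headings
-- ===== SOURCE A (Python) =====
-- def fix_blank_lines_around_headings(content: str) -> str:
--     """Add blank lines before and after headings."""
--     lines = content.split("\n")
--     result = []
--
--     for i, line in enumerate(lines):
--         # Check if current line is a heading
--         if line.startswith("#") and not line.startswith("#!"):
--             # Add blank line before heading if previous line is not blank
--             if i > 0 and result and result[-1].strip():
--                 result.append("")
--
--             result.append(line)
--
--             # Add blank line after heading if next line is not blank
--             if i < len(lines) - 1 and lines[i + 1].strip():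
--                 result.append("")
--         else:
--             result.append(line)
--
--     return "\n".join(result)
-- ===== SOURCE B (Python) =====
-- def fix_blank_lines_around_headings(content: str) -> str:
--     """Add blank lines before and after headings (two staged passes)."""
--
--     def is_heading(s):
--         return s.startswith("#") and not s.startswith("#!")
--
--     lines = content.split("\n")
--     # pass 1: a blank line after every heading whose following line is non-blank
--     pass1 = [x
--              for cur, nxt in zip(lines, lines[1:] + [""])
--              for x in ([cur, ""] if is_heading(cur) and nxt.strip() else [cur])]
--     # pass 2: a blank line before every heading whose predecessor (in pass 1's output) is non-blank
--     out = []
--     for cur in pass1: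
--         if is_heading(cur) and out and out[-1].strip():
--             out.append("")
--         out.append(cur)
--     return "\n".join(out)
-- ===== Notes on version B (the rewrite author's own statement) =====
-- stated objective: alternative
-- what changed: A's single accumulator loop with indexed look-ahead to lines[i+1] and inspection of result[-1] is replaced by two staged passes: pass 1 (a zip-with-sentinel flat comprehension) inserts the blank line after each heading, and pass 2 scans pass 1's intermediate output inserting the blank line before each heading; it trades an intermediate list for the index-free staged decomposition.
import Mathlib
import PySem

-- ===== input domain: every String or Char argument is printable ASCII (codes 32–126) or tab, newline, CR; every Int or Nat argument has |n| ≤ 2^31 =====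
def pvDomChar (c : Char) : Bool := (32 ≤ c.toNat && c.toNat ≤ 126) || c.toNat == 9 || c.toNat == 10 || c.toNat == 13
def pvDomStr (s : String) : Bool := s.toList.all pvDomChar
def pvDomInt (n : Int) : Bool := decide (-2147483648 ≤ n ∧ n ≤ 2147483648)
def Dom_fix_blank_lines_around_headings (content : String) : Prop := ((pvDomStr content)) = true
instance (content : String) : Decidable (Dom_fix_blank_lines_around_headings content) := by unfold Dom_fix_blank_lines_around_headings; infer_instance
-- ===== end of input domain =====

-- B replaces A's single accumulator pass (look-ahead to lines[i+1] plus inspection of result[-1])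
-- by two staged passes: pass 1 inserts the blank AFTER headings, pass 2 the blank BEFORE them;
-- objective: alternative decomposition (builds an intermediate list, same asymptotic cost).

-- ===== PORT A =====
-- loop body of A: indexed, look-behind via result[-1], look-ahead via lines[i+1]
def pvStepA (lines : List String) (result : List String) (il : Int × String) : List String :=
  match il with
  | (i, line) =>
  if PySem.Str.startswith line "#" && !(PySem.Str.startswith line "#!") then
    let result :=
      if 0 < i ∧ result ≠ [] ∧ PySem.Str.strip ((PySem.List.pyGet? result (-1)).getD "") ≠ "" then
        result ++ [""] else result
    let result := result ++ [line]
    if i < (lines.length : Int) - 1 ∧ PySem.Str.strip ((PySem.List.pyGet? lines (i + 1)).getD "") ≠ "" then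
      result ++ [""] else result
  else result ++ [line]

def fix_blank_lines_around_headings (content : String) : String :=
  let lines := (PySem.Str.split? content "\n").getD []
  let result := (PySem.List.enumerate lines).foldl (pvStepA lines) []
  PySem.Str.join "\n" result

-- ===== PORT B =====
def pvIsHeading (s : String) : Bool :=
  PySem.Str.startswith s "#" && !(PySem.Str.startswith s "#!")

-- pass 1 segment for one (cur, next) pair: cur, plus a blank after a heading followed by a non-blank
def pvSeg1 (pc : String × String) : List String :=
  if pvIsHeading pc.1 && decide (PySem.Str.strip pc.2 ≠ "") then [pc.1, ""] else [pc.1]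

-- pass 2 step: a blank before a heading whose predecessor in pass 1's output is non-blank
def pvStep2 (out : List String) (cur : String) : List String :=
  (if pvIsHeading cur && decide (out ≠ []) &&
      decide (PySem.Str.strip ((PySem.List.pyGet? out (-1)).getD "") ≠ "") then
    out ++ [""] else out) ++ [cur]

def fix_blank_lines_around_headings_alt (content : String) : String :=
  let lines := (PySem.Str.split? content "\n").getD []
  let pass1 := (lines.zip (lines.drop 1 ++ [""])).flatMap pvSeg1
  let out := pass1.foldl pvStep2 []
  PySem.Str.join "\n" out

-- ===== PRECONDITION & SPEC =====
def Spec_fix_blank_lines_around_headings (content : String) (out : String) : Prop := out = fix_blank_lines_around_headings_alt content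
instance (content : String) (out : String) : Decidable (Spec_fix_blank_lines_around_headings content out) := by unfold Spec_fix_blank_lines_around_headings; infer_instance

-- ===== CLAIM (what is proved, stated in full; the proofs are below) =====
def Claim_equal_fix_blank_lines_around_headings : Prop := ∀ (content : String), Dom_fix_blank_lines_around_headings content → Spec_fix_blank_lines_around_headings content (fix_blank_lines_around_headings content)

-- ===== LEMMAS AND PROOFS =====

-- the separator that ends up between the consecutive original lines prev and cur
def pvSep (prev cur : String) : List String :=
  if (pvIsHeading cur && decide (PySem.Str.strip prev ≠ "")) ||
     (pvIsHeading prev && decide (PySem.Str.strip cur ≠ "")) then [""] else []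

-- canonical emissions after the first line
def pvSegs : String → List String → List String
  | _, [] => []
  | prev, cur :: tl => pvSep prev cur ++ [cur] ++ pvSegs cur tl

-- the blank A appends right after a heading prev when the next line cur is non-blank
def pvAfter2 (prev cur : String) : List String :=
  if pvIsHeading prev = true ∧ PySem.Str.strip cur ≠ "" then [""] else []

-- same, phrased on the list of remaining lines
def pvAfterC (prev : String) (rest : List String) : List String :=
  if pvIsHeading prev = true ∧ rest ≠ [] ∧ PySem.Str.strip (rest.headD "") ≠ "" then [""] else []

-- the last element of A's accumulator after the step of prev, when cur is the next line
def pvLast2 (prev cur : String) : String :=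
  if pvIsHeading prev = true ∧ PySem.Str.strip cur ≠ "" then "" else prev

-- same, phrased on the list of remaining lines
def pvLastC (prev : String) (rest : List String) : String :=
  if pvIsHeading prev = true ∧ rest ≠ [] ∧ PySem.Str.strip (rest.headD "") ≠ "" then "" else prev

-- the blank A prepends before cur (result[-1] being pvLast2 prev cur at that moment)
def pvBefore (prev cur : String) : List String :=
  if pvIsHeading cur = true ∧ PySem.Str.strip (pvLast2 prev cur) ≠ "" then [""] else []

-- A's emissions from the step after prev onward (prev's own look-ahead blank excluded)
def pvSegsA : String → List String → List String
  | _, [] => []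
  | prev, cur :: tl => pvBefore prev cur ++ [cur] ++ pvAfterC cur tl ++ pvSegsA cur tl

lemma pvAfterC_nil (prev : String) : pvAfterC prev [] = [] := by simp [pvAfterC]

lemma pvAfterC_cons (prev cur : String) (tl : List String) :
    pvAfterC prev (cur :: tl) = pvAfter2 prev cur := by
  simp [pvAfterC, pvAfter2]

lemma pvLastC_cons (prev cur : String) (tl : List String) :
    pvLastC prev (cur :: tl) = pvLast2 prev cur := by
  simp [pvLastC, pvLast2]

-- the look-ahead blank of prev together with the look-behind blank of cur is exactly pvSep
lemma after_before_eq_sep (prev cur : String) :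
    pvAfter2 prev cur ++ pvBefore prev cur = pvSep prev cur := by
  unfold pvAfter2 pvBefore pvLast2 pvSep
  by_cases hp : pvIsHeading prev = true ∧ PySem.Str.strip cur ≠ ""
  · have hc : ¬ (pvIsHeading cur = true ∧ PySem.Str.strip ("" : String) ≠ "") := by
      intro ⟨_, hne⟩; exact hne (by rfl)
    rw [if_pos hp, if_pos hp, if_neg hc,
      if_pos (show (pvIsHeading cur && decide (PySem.Str.strip prev ≠ "") ||
        pvIsHeading prev && decide (PySem.Str.strip cur ≠ "")) = true by simp [hp.1, hp.2])]
    simp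
  · rw [if_neg hp, if_neg hp]
    by_cases hc : pvIsHeading cur = true ∧ PySem.Str.strip prev ≠ ""
    · rw [if_pos hc,
        if_pos (show (pvIsHeading cur && decide (PySem.Str.strip prev ≠ "") ||
          pvIsHeading prev && decide (PySem.Str.strip cur ≠ "")) = true by simp [hc.1, hc.2])]
      simp
    · rw [if_neg hc, if_neg ?_]
      · rfl
      · simp only [Bool.or_eq_true, Bool.and_eq_true, decide_eq_true_eq]
        intro hor
        rcases hor with h1 | h2
        · exact hc h1
        · exact hp h2

-- A's emissions and the canonical emissions differ only by where the shared blank is booked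
lemma segs_eq (rest : List String) : ∀ prev, pvAfterC prev rest ++ pvSegsA prev rest = pvSegs prev rest := by
  induction rest with
  | nil => intro prev; simp [pvAfterC_nil, pvSegsA, pvSegs]
  | cons cur tl ih =>
    intro prev
    show pvAfterC prev (cur :: tl) ++ (pvBefore prev cur ++ [cur] ++ pvAfterC cur tl ++ pvSegsA cur tl)
        = pvSep prev cur ++ [cur] ++ pvSegs cur tl
    rw [pvAfterC_cons]
    calc pvAfter2 prev cur ++ (pvBefore prev cur ++ [cur] ++ pvAfterC cur tl ++ pvSegsA cur tl)
        = (pvAfter2 prev cur ++ pvBefore prev cur) ++ [cur] ++ (pvAfterC cur tl ++ pvSegsA cur tl) := by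
          simp [List.append_assoc]
      _ = pvSep prev cur ++ [cur] ++ pvSegs cur tl := by
          rw [after_before_eq_sep, ih cur]

-- B-side characterisations ------------------------------------------------

-- pass 1's output after the first line
def pvP1t : String → List String → List String
  | _, [] => []
  | prev, cur :: tl =>
    (if pvIsHeading prev && decide (PySem.Str.strip cur ≠ "") then [""] else []) ++ [cur] ++ pvP1t cur tl

-- pass 2's emissions, given the last element already in the output (none = output empty)
def pvLastOK : Option String → Bool
  | none => false
  | some v => decide (PySem.Str.strip v ≠ "")

def pvF : Option String → List String → List String
  | _, [] => []
  | last?, x :: xs =>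
    (if pvIsHeading x && pvLastOK last? then [""] else []) ++ [x] ++ pvF (some x) xs

lemma strip_empty : PySem.Str.strip "" = "" := by decide

lemma heading_empty : pvIsHeading "" = false := by decide

-- the zip/flatMap of pass 1 computes l0 :: pvP1t l0 rest
lemma flatMap_p1 (rest : List String) : ∀ (l0 : String),
    ((l0 :: rest).zip (rest ++ [""])).flatMap pvSeg1 = l0 :: pvP1t l0 rest := by
  induction rest with
  | nil =>
    intro l0
    simp [pvSeg1, pvP1t, strip_empty]
  | cons cur tl ih =>
    intro l0
    rw [show (cur :: tl) ++ [""] = cur :: (tl ++ [""]) from rfl, List.zip_cons_cons,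
      List.flatMap_cons, ih cur]
    show pvSeg1 (l0, cur) ++ (cur :: pvP1t cur tl) = l0 :: pvP1t l0 (cur :: tl)
    rw [show pvP1t l0 (cur :: tl)
        = (if pvIsHeading l0 && decide (PySem.Str.strip cur ≠ "") then [""] else []) ++ [cur] ++ pvP1t cur tl from rfl]
    unfold pvSeg1
    by_cases h : (pvIsHeading l0 && decide (PySem.Str.strip cur ≠ "")) = true
    · rw [if_pos h, if_pos h]
      simp
    · rw [if_neg h, if_neg h]
      simp

-- pass 2's fold equals acc ++ pvF acc.getLast? input
lemma fold2_F (xs : List String) : ∀ (acc : List String),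
    xs.foldl pvStep2 acc = acc ++ pvF acc.getLast? xs := by
  induction xs with
  | nil => intro acc; simp [pvF]
  | cons x tl ih =>
    intro acc
    rw [List.foldl_cons, ih]
    have hstep : pvStep2 acc x = acc ++ ((if pvIsHeading x && pvLastOK acc.getLast? then [""] else []) ++ [x]) := by
      unfold pvStep2
      cases h : acc.getLast? with
      | none =>
        have hnil : acc = [] := List.getLast?_eq_none_iff.mp h
        subst hnil
        simp [pvLastOK]
      | some v =>
        have hne : acc ≠ [] := by
          intro hcon; subst hcon; simp at h
        rw [PySem.List.pyGet?_neg_one, h]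
        simp only [Option.getD_some]
        by_cases hv : PySem.Str.strip v = ""
        · simp [pvLastOK, hv]
        · by_cases hx : pvIsHeading x = true
          · simp [pvLastOK, hne, hv, hx]
          · simp [pvLastOK, hv, hx]
    rw [hstep]
    have hlast : (acc ++ ((if pvIsHeading x && pvLastOK acc.getLast? then [""] else []) ++ [x])).getLast? = some x := by
      by_cases h : (pvIsHeading x && pvLastOK acc.getLast?) = true <;> simp [h]
    rw [hlast]
    show acc ++ ((if pvIsHeading x && pvLastOK acc.getLast? then [""] else []) ++ [x]) ++ pvF (some x) tl
        = acc ++ pvF acc.getLast? (x :: tl)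
    simp [pvF, List.append_assoc]

-- pass 2 over pass 1's tail produces exactly the canonical emissions
lemma F_p1_segs (rest : List String) : ∀ (prev : String),
    pvF (some prev) (pvP1t prev rest) = pvSegs prev rest := by
  induction rest with
  | nil => intro prev; simp [pvP1t, pvF, pvSegs]
  | cons cur tl ih =>
    intro prev
    rw [show pvP1t prev (cur :: tl)
        = (if pvIsHeading prev && decide (PySem.Str.strip cur ≠ "") then [""] else []) ++ [cur] ++ pvP1t cur tl from rfl,
      show pvSegs prev (cur :: tl) = pvSep prev cur ++ [cur] ++ pvSegs cur tl from rfl]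
    by_cases h : (pvIsHeading prev && decide (PySem.Str.strip cur ≠ "")) = true
    · rw [if_pos h]
      show pvF (some prev) ("" :: cur :: pvP1t cur tl) = pvSep prev cur ++ [cur] ++ pvSegs cur tl
      rw [show pvF (some prev) ("" :: cur :: pvP1t cur tl)
          = (if pvIsHeading "" && pvLastOK (some prev) then [""] else []) ++ [""]
            ++ ((if pvIsHeading cur && pvLastOK (some "") then [""] else []) ++ [cur] ++ pvF (some cur) (pvP1t cur tl)) from rfl]
      have h0 : (pvIsHeading "" && pvLastOK (some prev)) = false := by
        rw [heading_empty]; simp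
      have h1 : (pvIsHeading cur && pvLastOK (some "")) = false := by
        have : pvLastOK (some "") = false := by simp [pvLastOK, strip_empty]
        rw [this]; simp
      have hsep : pvSep prev cur = [""] := by
        unfold pvSep
        rw [if_pos (by simp only [Bool.or_eq_true]; exact Or.inr h)]
      rw [h0, h1, hsep, ih cur]
      simp
    · rw [if_neg h]
      show pvF (some prev) (cur :: pvP1t cur tl) = pvSep prev cur ++ [cur] ++ pvSegs cur tl
      rw [show pvF (some prev) (cur :: pvP1t cur tl)
          = (if pvIsHeading cur && pvLastOK (some prev) then [""] else []) ++ [cur] ++ pvF (some cur) (pvP1t cur tl) from rfl]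
      have hsep : (if pvIsHeading cur && pvLastOK (some prev) then [""] else []) = pvSep prev cur := by
        unfold pvSep pvLastOK
        have hh : (pvIsHeading cur && decide (PySem.Str.strip prev ≠ "") ||
            pvIsHeading prev && decide (PySem.Str.strip cur ≠ ""))
            = (pvIsHeading cur && decide (PySem.Str.strip prev ≠ "")) := by
          rw [Bool.eq_false_iff.mpr h]
          simp
        rw [hh]
      rw [hsep, ih cur]

-- A's fold, from the line after prev onward, computes pvSegsA
lemma foldA (lines : List String) (rest : List String) : ∀ (j : Nat) (prev : String) (acc : List String),
    lines.drop (j + 1) = rest → acc ≠ [] → acc.getLast? = some (pvLastC prev rest) →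
    (PySem.List.enumerate rest ((j : Int) + 1)).foldl (pvStepA lines) acc = acc ++ pvSegsA prev rest := by
  induction rest with
  | nil => intro j prev acc _ _ _; simp [PySem.List.enumerate_nil, pvSegsA]
  | cons cur tl ih =>
    intro j prev acc hdrop hacc hlast
    rw [PySem.List.enumerate_cons, List.foldl_cons]
    rw [pvLastC_cons] at hlast
    have hlen : lines.length = j + 2 + tl.length := by
      have h1 : (lines.drop (j + 1)).length = lines.length - (j + 1) := List.length_drop ..
      rw [hdrop] at h1
      simp only [List.length_cons] at h1
      omega
    have hstep : pvStepA lines acc ((j : Int) + 1, cur)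
        = acc ++ (pvBefore prev cur ++ [cur] ++ pvAfterC cur tl) := by
      unfold pvStepA
      simp only
      rw [PySem.List.pyGet?_neg_one, hlast, Option.getD_some]
      have hget : (PySem.List.pyGet? lines ((j : Int) + 1 + 1)).getD "" = tl.headD "" := by
        have hcast : ((j : Int) + 1 + 1) = ((j + 2 : Nat) : Int) := by push_cast; ring
        rw [hcast, PySem.List.pyGet?_natCast]
        have : lines[j + 2]? = tl[0]? := by
          have h2 : (lines.drop (j + 1))[1]? = lines[(j + 1) + 1]? := (List.getElem?_drop ..)
          rw [hdrop] at h2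
          simpa using h2.symm
        rw [this]
        cases tl <;> simp
      rw [hget]
      have hcond2 : ((j : Int) + 1 < (lines.length : Int) - 1 ∧ PySem.Str.strip (tl.headD "") ≠ "")
          ↔ (tl ≠ [] ∧ PySem.Str.strip (tl.headD "") ≠ "") := by
        constructor
        · rintro ⟨h1, h2⟩
          refine ⟨?_, h2⟩
          intro htl
          subst htl
          simp only [List.length_nil] at hlen
          omega
        · rintro ⟨h1, h2⟩
          refine ⟨?_, h2⟩
          have : tl.length ≠ 0 := by simpa [List.length_eq_zero_iff] using h1
          omega
      by_cases hh : (PySem.Str.startswith cur "#" && !PySem.Str.startswith cur "#!") = true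
      · rw [if_pos hh]
        have hhh : pvIsHeading cur = true := hh
        have hbefore : (if 0 < (j : Int) + 1 ∧ acc ≠ [] ∧ PySem.Str.strip (pvLast2 prev cur) ≠ "" then acc ++ [""] else acc)
            = acc ++ pvBefore prev cur := by
          unfold pvBefore
          by_cases hs : PySem.Str.strip (pvLast2 prev cur) ≠ ""
          · rw [if_pos ⟨by omega, hacc, hs⟩, if_pos ⟨hhh, hs⟩]
          · rw [if_neg (by intro ⟨_, _, h3⟩; exact hs h3), if_neg (by intro ⟨_, h3⟩; exact hs h3)]
            simp
        rw [hbefore]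
        have hafter : (if (j : Int) + 1 < (lines.length : Int) - 1 ∧ PySem.Str.strip (tl.headD "") ≠ ""
              then acc ++ pvBefore prev cur ++ [cur] ++ [""] else acc ++ pvBefore prev cur ++ [cur])
            = acc ++ (pvBefore prev cur ++ [cur] ++ pvAfterC cur tl) := by
          unfold pvAfterC
          by_cases hc : tl ≠ [] ∧ PySem.Str.strip (tl.headD "") ≠ ""
          · rw [if_pos (hcond2.mpr hc), if_pos ⟨hhh, hc⟩]
            simp [List.append_assoc]
          · rw [if_neg (fun h => hc (hcond2.mp h)), if_neg (by intro ⟨_, h2⟩; exact hc h2)]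
            simp [List.append_assoc]
        exact hafter
      · rw [if_neg hh]
        have hhh : pvIsHeading cur = false := by
          unfold pvIsHeading
          exact Bool.not_eq_true _ ▸ hh
        have h1 : pvBefore prev cur = [] := by
          unfold pvBefore
          rw [if_neg (by intro ⟨h2, _⟩; rw [hhh] at h2; exact Bool.false_ne_true h2)]
        have h2 : pvAfterC cur tl = [] := by
          unfold pvAfterC
          rw [if_neg (by intro ⟨h3, _⟩; rw [hhh] at h3; exact Bool.false_ne_true h3)]
        rw [h1, h2]
        simp
    rw [hstep]
    have hdrop' : lines.drop (j + 1 + 1) = tl := by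
      rw [← List.drop_drop, hdrop]
      rfl
    have hlast' : (acc ++ (pvBefore prev cur ++ [cur] ++ pvAfterC cur tl)).getLast? = some (pvLastC cur tl) := by
      unfold pvAfterC pvLastC
      by_cases hc : pvIsHeading cur = true ∧ tl ≠ [] ∧ PySem.Str.strip (tl.headD "") ≠ ""
      · rw [if_pos hc, if_pos hc]
        simp
      · rw [if_neg hc, if_neg hc]
        simp
    have hcast : ((j : Int) + 1 + 1) = (((j + 1 : Nat) : Int) + 1) := by push_cast; ring
    rw [hcast, ih (j + 1) cur (acc ++ (pvBefore prev cur ++ [cur] ++ pvAfterC cur tl)) hdrop' (by simp) hlast']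
    show acc ++ (pvBefore prev cur ++ [cur] ++ pvAfterC cur tl) ++ pvSegsA cur tl
        = acc ++ pvSegsA prev (cur :: tl)
    simp [pvSegsA, List.append_assoc]

-- ===== VERDICT (by name: the statement is the Claim_ definition above) =====
theorem fix_blank_lines_around_headings_spec : Claim_equal_fix_blank_lines_around_headings := by
  intro content _
  unfold Spec_fix_blank_lines_around_headings
  unfold fix_blank_lines_around_headings fix_blank_lines_around_headings_alt
  simp only
  cases hl : (PySem.Str.split? content "\n").getD [] with
  | nil => simp [PySem.List.enumerate_nil]
  | cons l0 rest =>
    -- B side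
    have hB : (((l0 :: rest).zip ((l0 :: rest).drop 1 ++ [""])).flatMap pvSeg1).foldl pvStep2 []
        = [l0] ++ pvSegs l0 rest := by
      rw [show (l0 :: rest).drop 1 = rest from rfl, flatMap_p1 rest l0, fold2_F]
      show [] ++ pvF none (l0 :: pvP1t l0 rest) = [l0] ++ pvSegs l0 rest
      unfold pvF
      rw [show pvLastOK none = false from rfl]
      simp only [Bool.and_false, if_neg Bool.false_ne_true, F_p1_segs rest l0]
      simp
    -- A side: first step
    have hfirst : pvStepA (l0 :: rest) [] ((0 : Int), l0) = [l0] ++ pvAfterC l0 rest := by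
      unfold pvStepA
      simp only
      have hc1 : ¬ ((0 : Int) < 0 ∧ ([] : List String) ≠ [] ∧
          PySem.Str.strip ((PySem.List.pyGet? ([] : List String) (-1)).getD "") ≠ "") := by
        intro h; exact absurd h.1 (by omega)
      have hget : (PySem.List.pyGet? (l0 :: rest) ((0 : Int) + 1)).getD "" = rest.headD "" := by
        have hcast : ((0 : Int) + 1) = ((1 : Nat) : Int) := by norm_num
        rw [hcast, PySem.List.pyGet?_natCast]
        cases rest <;> simp
      have hcond2 : ((0 : Int) < ((l0 :: rest).length : Int) - 1 ∧ PySem.Str.strip (rest.headD "") ≠ "")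
          ↔ (rest ≠ [] ∧ PySem.Str.strip (rest.headD "") ≠ "") := by
        simp only [List.length_cons]
        constructor
        · rintro ⟨h1, h2⟩
          refine ⟨?_, h2⟩
          intro htl; subst htl; simp at h1
        · rintro ⟨h1, h2⟩
          have : rest.length ≠ 0 := by simpa [List.length_eq_zero_iff] using h1
          refine ⟨by push_cast; omega, h2⟩
      by_cases hh : (PySem.Str.startswith l0 "#" && !PySem.Str.startswith l0 "#!") = true
      · rw [if_pos hh, if_neg hc1, hget]
        have hhh : pvIsHeading l0 = true := hh
        unfold pvAfterC
        by_cases hc : rest ≠ [] ∧ PySem.Str.strip (rest.headD "") ≠ ""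
        · rw [if_pos (hcond2.mpr hc), if_pos ⟨hhh, hc⟩]
          simp
        · rw [if_neg (fun h => hc (hcond2.mp h)), if_neg (by intro ⟨_, h2⟩; exact hc h2)]
          simp
      · rw [if_neg hh]
        have hhh : pvIsHeading l0 = false := by
          unfold pvIsHeading; exact Bool.not_eq_true _ ▸ hh
        unfold pvAfterC
        rw [if_neg (by intro ⟨h3, _⟩; rw [hhh] at h3; exact Bool.false_ne_true h3)]
        simp
    have hlast0 : ([l0] ++ pvAfterC l0 rest).getLast? = some (pvLastC l0 rest) := by
      unfold pvAfterC pvLastC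
      by_cases hc : pvIsHeading l0 = true ∧ rest ≠ [] ∧ PySem.Str.strip (rest.headD "") ≠ ""
      · rw [if_pos hc, if_pos hc]; simp
      · rw [if_neg hc, if_neg hc]; simp
    have hA : (PySem.List.enumerate (l0 :: rest) 0).foldl (pvStepA (l0 :: rest)) []
        = [l0] ++ pvSegs l0 rest := by
      rw [PySem.List.enumerate_cons, List.foldl_cons, hfirst]
      have hzero : (0 : Int) + 1 = ((0 : Nat) : Int) + 1 := by norm_num
      rw [hzero, foldA (l0 :: rest) rest 0 l0 ([l0] ++ pvAfterC l0 rest)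
        (by simp) (by simp) hlast0]
      rw [List.append_assoc, segs_eq rest l0]
    rw [hA, hB]
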